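-- pv_equiv track=rewrite | github.com/mengesha9/A2SV-competitive-programming | contest/C_Special_Numbers.py | findbits
-- ===== SOURCE A (Python) =====
-- def findbits(n,k):
--     res = 0
--     x = 0
--     while k:
--         if k % 2 != 0:
--             res += n**(x)
--         x += 1
--         k >>=1
--     return res
-- ===== SOURCE B (Python) =====
-- def findbits(n, k):
--     # Horner evaluation of k's bits (MSB first) as a polynomial in n.
--     res = 0
--     for i in range(k.bit_length() - 1, -1, -1):
--         res = res * n + ((k >> i) & 1)
--     return res
-- ===== Notes on version B (the rewrite author's own statement) =====
-- stated objective: alternative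
-- what changed: Replaces the LSB-first loop that computes n**x afresh for each set bit with an MSB-first Horner evaluation (res = res*n + bit) over range(k.bit_length()-1,-1,-1), never forming an explicit power.
import Mathlib
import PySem

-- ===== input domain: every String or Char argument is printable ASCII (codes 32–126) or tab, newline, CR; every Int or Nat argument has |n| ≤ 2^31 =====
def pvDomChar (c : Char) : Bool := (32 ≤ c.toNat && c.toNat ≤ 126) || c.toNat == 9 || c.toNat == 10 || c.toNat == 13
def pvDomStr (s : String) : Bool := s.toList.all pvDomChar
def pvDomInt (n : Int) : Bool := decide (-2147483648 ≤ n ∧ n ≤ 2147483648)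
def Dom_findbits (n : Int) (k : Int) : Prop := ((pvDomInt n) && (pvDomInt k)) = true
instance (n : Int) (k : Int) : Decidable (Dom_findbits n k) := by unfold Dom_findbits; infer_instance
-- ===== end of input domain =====

-- B replaces A's LSB-first loop with explicit powers n**x by an MSB-first Horner
-- evaluation of k's bits (alternative decomposition, no explicit power).

-- ===== PORT A =====
-- while k: if k % 2 != 0: res += n**x; x += 1; k >>= 1
-- (the 'k ≤ 0' guard only makes the recursion total: for k < 0 the Python loop
-- never terminates, which Pre_findbits excludes)
def findbitsGo (n : Int) (k : Int) (res : Int) (x : Nat) : Int :=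
  if h : k ≤ 0 then res
  else
    findbitsGo n (k >>> (1 : Nat))
      (if PySem.Int.mod k 2 ≠ 0 then res + n ^ x else res) (x + 1)
termination_by k.toNat
decreasing_by
  have hk : 0 < k := by omega
  have : k >>> (1 : Nat) = k / 2 := by
    simpa using Int.shiftRight_eq_div_pow k 1
  omega

def findbits (n : Int) (k : Int) : Int := findbitsGo n k 0 0

-- ===== PORT B =====
-- res = 0; for i in range(k.bit_length()-1, -1, -1): res = res*n + ((k>>i)&1)
-- (i ≥ 0 everywhere in the range, so 'i.toNat' is exact for Python's 'k >> i')
def findbits_alt (n : Int) (k : Int) : Int :=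
  (PySem.List.pyRange ((PySem.Int.bitLength k : Int) - 1) (-1) (-1)).foldl
    (fun res i => res * n + PySem.Int.band (k >>> i.toNat) 1) 0

-- ===== PRECONDITION & SPEC =====
-- For k < 0 the Python loop never terminates (k >>= 1 stalls at -1), so A
-- returns only for k ≥ 0.
def Pre_findbits (n : Int) (k : Int) : Prop := 0 ≤ k
instance (n : Int) (k : Int) : Decidable (Pre_findbits n k) := by unfold Pre_findbits; infer_instance
def pvWitness_findbits : Int × Int := (3, 13)

def Spec_findbits (n : Int) (k : Int) (out : Int) : Prop := out = findbits_alt n k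
instance (n : Int) (k : Int) (out : Int) : Decidable (Spec_findbits n k out) := by unfold Spec_findbits; infer_instance

-- ===== CLAIM (what is proved, stated in full; the proofs are below) =====
def Claim_equal_findbits : Prop := ∀ (n : Int) (k : Int), Dom_findbits n k → Pre_findbits n k → Spec_findbits n k (findbits n k)

-- ===== LEMMAS AND PROOFS =====

-- the common specification: value of k's bits as a polynomial in n, LSB first
def bitsVal (n : Int) (m : Nat) : Int :=
  if m = 0 then 0 else (m % 2 : Nat) + n * bitsVal n (m / 2)

theorem bitsVal_zero (n : Int) : bitsVal n 0 = 0 := by simp [bitsVal]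

theorem bitsVal_pos (n : Int) (m : Nat) (h : m ≠ 0) :
    bitsVal n m = (m % 2 : Nat) + n * bitsVal n (m / 2) := by
  rw [bitsVal]; simp [h]

theorem shiftRight_int_of_nonneg (k : Int) (hk : 0 ≤ k) (t : Nat) :
    k >>> t = ((k.toNat >>> t : Nat) : Int) := by
  rw [Int.shiftRight_eq_div_pow, Nat.shiftRight_eq_div_pow, Int.natCast_div]
  push_cast
  congr 1
  omega

-- ---- A side ----
theorem findbitsGo_eq (n : Int) : ∀ (m : Nat) (res : Int) (x : Nat),
    findbitsGo n (m : Int) res x = res + n ^ x * bitsVal n m := by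
  intro m
  induction m using Nat.strong_induction_on with
  | _ m ih =>
    intro res x
    rw [findbitsGo]
    by_cases hm : m = 0
    · subst hm; simp [bitsVal_zero]
    · have hpos : ¬ ((m : Int) ≤ 0) := by omega
      rw [dif_neg hpos]
      have hs : (m : Int) >>> (1:Nat) = ((m / 2 : Nat) : Int) := by
        simpa [Nat.shiftRight_succ, Nat.shiftRight_zero] using
          shiftRight_int_of_nonneg (m : Int) (by omega) 1
      have hmod : PySem.Int.mod (m : Int) 2 = ((m % 2 : Nat) : Int) := by
        exact_mod_cast PySem.Int.mod_natCast m 2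
      rw [hs, ih (m / 2) (by omega), bitsVal_pos n m hm, hmod]
      rcases Nat.mod_two_eq_zero_or_one m with hp | hp
      · simp [hp, pow_succ]; ring
      · simp [hp, pow_succ]; ring

theorem findbits_eq (n k : Int) (hk : 0 ≤ k) :
    findbits n k = bitsVal n k.toNat := by
  have h : (k.toNat : Int) = k := by omega
  unfold findbits
  rw [← h, findbitsGo_eq]
  simp
  congr 1
  omega

-- ---- B side ----
theorem bitsVal_eq (n : Int) (m : Nat) :
    bitsVal n m = (m % 2 : Nat) + n * bitsVal n (m / 2) := by
  by_cases hm : m = 0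
  · subst hm; simp [bitsVal]
  · exact bitsVal_pos n m hm

theorem bitsVal_mod_succ (n : Int) (t : Nat) : ∀ (m : Nat),
    bitsVal n (m % 2 ^ (t + 1)) = (m / 2 ^ t % 2 : Nat) * n ^ t + bitsVal n (m % 2 ^ t) := by
  induction t with
  | zero =>
    intro m
    simp only [pow_zero, Nat.mod_one, Nat.div_one, bitsVal_zero]
    rcases Nat.mod_two_eq_zero_or_one m with hp | hp <;> simp [bitsVal, hp]
  | succ t ih =>
    intro m
    have hd1 : m % 2 ^ (t + 2) / 2 = m / 2 % 2 ^ (t + 1) := by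
      have := Nat.mod_mul_right_div_self m 2 (2 ^ (t + 1))
      simpa [pow_succ, pow_succ, Nat.mul_comm] using this
    have hd2 : m % 2 ^ (t + 1) / 2 = m / 2 % 2 ^ t := by
      have := Nat.mod_mul_right_div_self m 2 (2 ^ t)
      simpa [pow_succ, Nat.mul_comm] using this
    have hm1 : m % 2 ^ (t + 2) % 2 = m % 2 := Nat.mod_mod_of_dvd m (dvd_pow_self 2 (by omega))
    have hm2 : m % 2 ^ (t + 1) % 2 = m % 2 := Nat.mod_mod_of_dvd m (dvd_pow_self 2 (by omega))
    have hq : m / 2 / 2 ^ t = m / 2 ^ (t + 1) := by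
      rw [Nat.div_div_eq_div_mul, pow_succ, Nat.mul_comm]
    rw [bitsVal_eq n (m % 2 ^ (t + 2)), hd1, hm1, ih (m / 2), hq,
        bitsVal_eq n (m % 2 ^ (t + 1)), hd2, hm2]
    push_cast
    ring

-- one Horner step of B's fold
theorem hornerFold_eq (n k : Int) (hk : 0 ≤ k) : ∀ (t : Nat) (r : Int),
    (PySem.List.pyRange ((t : Int) - 1) (-1) (-1)).foldl
      (fun res i => res * n + PySem.Int.band (k >>> i.toNat) 1) r
    = r * n ^ t + bitsVal n (k.toNat % 2 ^ t) := by
  intro t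
  induction t with
  | zero =>
    intro r
    rw [PySem.List.pyRange_neg_one_eq_nil (by omega)]
    simp [Nat.mod_one, bitsVal_zero]
  | succ t ih =>
    intro r
    push_cast
    have hcons : PySem.List.pyRange (((t : Nat) + 1 : Int) - 1) (-1) (-1)
        = (t : Int) :: PySem.List.pyRange ((t : Int) - 1) (-1) (-1) := by
      have := PySem.List.pyRange_neg_one_cons (a := ((t : Nat) + 1 : Int) - 1) (b := -1) (by omega)
      simpa using this
    have hbit : PySem.Int.band (k >>> t) 1 = ((k.toNat / 2 ^ t % 2 : Nat) : Int) := by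
      rw [PySem.Int.band_one, shiftRight_int_of_nonneg k hk t, Nat.shiftRight_eq_div_pow]
      exact_mod_cast PySem.Int.mod_natCast (k.toNat / 2 ^ t) 2
    rw [hcons, List.foldl_cons, ih, Int.toNat_natCast, Int.shiftRight_natCast_right,
        hbit, bitsVal_mod_succ n t k.toNat]
    ring

theorem findbits_alt_eq (n k : Int) (hk : 0 ≤ k) :
    findbits_alt n k = bitsVal n k.toNat := by
  unfold findbits_alt
  rw [hornerFold_eq n k hk (PySem.Int.bitLength k) 0]
  have hlt : k.toNat < 2 ^ PySem.Int.bitLength k := by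
    have := PySem.Int.lt_two_pow_bitLength k
    omega
  rw [Nat.mod_eq_of_lt hlt]
  ring

-- ===== VERDICT (by name: the statement is the Claim_ definition above) =====
theorem findbits_spec : Claim_equal_findbits := by
  intro n k _ hk
  unfold Spec_findbits
  rw [findbits_eq n k hk, findbits_alt_eq n k hk]
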